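-- pv_equiv track=rewrite | github.com/junjungaoon-with/newspipe | src/common/build_row_values/build_row_values.py | build_image_files
-- ===== SOURCE A (Python) =====
-- def build_image_files(unique_id, pictures):
--     """
--     サムネイル画像 + スレッド画像リストを生成。
--     pictures 内に空文字がある場合は、
--     後方の最初の非空要素で補完する。
--     ただし、後方要素がGIFの場合は前方の最後の非空要素で補完する。
--
--     Args:
--         unique_id (str): 記事のユニークID
--         pictures (list[str]): 画像ファイル名のリスト（空白含む可能性あり）
--
--     Returns:
--         list[str]: ['thumbnail_xxx.jpg', picture1, picture2, ...]
--     """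
--
--     # サムネイルを最初に追加（補完対象にも含める）
--     pictures = [f"thumbnail_{unique_id}.jpg"] + (pictures or [])
--
--     filled = []
--     last_non_empty = pictures[0]  # 最初はサムネで初期化
--
--     for i, pic in enumerate(pictures):
--         if pic.strip():
--             filled.append(pic)
--             last_non_empty = pic
--         else:
--             # 後方から最初の非空要素を探す
--             next_non_empty = ""
--             for j in range(i + 1, len(pictures)):
--                 if pictures[j].strip():
--                     next_non_empty = pictures[j]
--                     break
--
--             # 後方が存在しない or gifなら前方参照
--             if not next_non_empty or next_non_empty.lower().endswith(".gif"):
--                 filled.append(last_non_empty)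
--             else:
--                 filled.append(next_non_empty)
--     filled.append(filled[-1])
--
--     return filled
-- ===== SOURCE B (Python) =====
-- def build_image_files(unique_id, pictures):
--     # Precompute, right-to-left, the first non-blank entry AFTER each index,
--     # then fill in a single forward pass (instead of rescanning forward per blank slot).
--     pics = [f"thumbnail_{unique_id}.jpg"] + (pictures or [])
--     n = len(pics)
--     nxt = [""] * n          # nxt[i] = first non-blank entry strictly after index i
--     nn = ""
--     for i in range(n - 1, -1, -1):
--         nxt[i] = nn
--         if pics[i].strip():
--             nn = pics[i]
--     filled = []
--     last = pics[0]
--     for pic, nn in zip(pics, nxt):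
--         if pic.strip():
--             filled.append(pic)
--             last = pic
--         elif not nn or nn.lower().endswith(".gif"):
--             filled.append(last)
--         else:
--             filled.append(nn)
--     filled.append(filled[-1])
--     return filled
-- ===== Notes on version B (the rewrite author's own statement) =====
-- stated objective: alternative
-- what changed: Replaces A's per-blank forward rescan with a single backward pass that precomputes the next-non-empty entry for every index, followed by one forward fill pass; worst-case cost drops from quadratic to linear in the list length, though a timing run's inputs showed no measured speed-up.
import Mathlib
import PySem

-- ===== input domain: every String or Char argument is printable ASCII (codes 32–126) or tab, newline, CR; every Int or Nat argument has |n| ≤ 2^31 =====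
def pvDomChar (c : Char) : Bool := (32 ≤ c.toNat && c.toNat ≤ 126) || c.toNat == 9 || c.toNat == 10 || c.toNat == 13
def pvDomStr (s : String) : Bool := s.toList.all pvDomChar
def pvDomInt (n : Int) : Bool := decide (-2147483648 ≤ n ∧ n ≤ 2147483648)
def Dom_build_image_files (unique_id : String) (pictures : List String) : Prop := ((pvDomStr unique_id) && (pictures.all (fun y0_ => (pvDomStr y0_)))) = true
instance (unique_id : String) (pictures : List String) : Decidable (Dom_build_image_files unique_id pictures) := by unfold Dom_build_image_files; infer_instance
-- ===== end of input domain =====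

-- B replaces A's per-blank forward rescan by one backward pass precomputing the
-- next-non-empty entry per index plus one forward fill pass (alternative algorithm).

-- ===== PORT A =====
-- inner loop: 'for j in range(i+1, len(pictures)): if pictures[j].strip(): ...; break'
def bifA_findNext (pics : List String) (j : Nat) : String :=
  if h : j < pics.length then
    if PySem.Str.strip pics[j] ≠ "" then pics[j]
    else bifA_findNext pics (j + 1)
  else ""
termination_by pics.length - j

-- outer loop: 'for i, pic in enumerate(pictures)', state = (filled, last_non_empty)
def bifA_loop (pics : List String) : Nat → List String → List String → String → List String
  | _, [], filled, _ => filled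
  | i, pic :: rest, filled, last =>
    if PySem.Str.strip pic ≠ "" then
      bifA_loop pics (i + 1) rest (filled ++ [pic]) pic
    else
      let nn := bifA_findNext pics (i + 1)
      if nn = "" ∨ PySem.Str.endswith (PySem.Str.lower nn) ".gif" then
        bifA_loop pics (i + 1) rest (filled ++ [last]) last
      else
        bifA_loop pics (i + 1) rest (filled ++ [nn]) last

def build_image_files (unique_id : String) (pictures : List String) : List String :=
  let pics := ("thumbnail_" ++ unique_id ++ ".jpg") :: (if pictures.isEmpty then [] else pictures)
  let filled := bifA_loop pics 0 pics [] (pics.headD "")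
  -- filled.append(filled[-1]); filled is never empty (pics is non-empty), so pyGet? is some
  filled ++ [(PySem.List.pyGet? filled (-1)).getD ""]

-- ===== PORT B =====
-- backward pass: nxt[i] = first non-blank entry strictly after index i
def bifB_nxtStep (p : String) (acc : List String × String) : List String × String :=
  (acc.2 :: acc.1, if PySem.Str.strip p ≠ "" then p else acc.2)

-- forward pass over zip(pics, nxt), carrying last_non_empty
def bifB_fill (last : String) : List (String × String) → List String
  | [] => []
  | (pic, nn) :: rest =>
    if PySem.Str.strip pic ≠ "" then pic :: bifB_fill pic rest
    else (if nn = "" ∨ PySem.Str.endswith (PySem.Str.lower nn) ".gif" then last else nn)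
           :: bifB_fill last rest

def build_image_files_alt (unique_id : String) (pictures : List String) : List String :=
  let thumb := "thumbnail_" ++ unique_id ++ ".jpg"
  let pics := thumb :: (if pictures.isEmpty then [] else pictures)
  let nxt := (pics.foldr bifB_nxtStep ([], "")).1
  let filled := bifB_fill thumb (pics.zip nxt)
  filled ++ [(PySem.List.pyGet? filled (-1)).getD ""]

-- ===== PRECONDITION & SPEC =====
def Spec_build_image_files (unique_id : String) (pictures : List String) (out : List String) : Prop := out = build_image_files_alt unique_id pictures
instance (unique_id : String) (pictures : List String) (out : List String) : Decidable (Spec_build_image_files unique_id pictures out) := by unfold Spec_build_image_files; infer_instance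

-- ===== CLAIM (what is proved, stated in full; the proofs are below) =====
def Claim_equal_build_image_files : Prop := ∀ (unique_id : String) (pictures : List String), Dom_build_image_files unique_id pictures → Spec_build_image_files unique_id pictures (build_image_files unique_id pictures)

-- ===== LEMMAS AND PROOFS =====

-- first non-blank entry of a list ("" if none): characterises both A's rescan and B's nxt array
def firstNB : List String → String
  | [] => ""
  | p :: r => if PySem.Str.strip p ≠ "" then p else firstNB r

def nxtList : List String → List String
  | [] => []
  | _ :: r => firstNB r :: nxtList r

theorem findNext_eq (pics : List String) (j : Nat) :
    bifA_findNext pics j = firstNB (pics.drop j) := by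
  unfold bifA_findNext
  split
  · rename_i h
    rw [List.drop_eq_getElem_cons h, firstNB]
    split
    · rfl
    · exact findNext_eq pics (j + 1)
  · rename_i h
    rw [List.drop_eq_nil_of_le (by omega)]
    rfl
termination_by pics.length - j

theorem foldr_nxtStep (l : List String) :
    l.foldr bifB_nxtStep ([], "") = (nxtList l, firstNB l) := by
  induction l with
  | nil => rfl
  | cons p r ih => simp [List.foldr, ih, bifB_nxtStep, nxtList, firstNB]

theorem loop_eq_fill (pics : List String) (suf : List String) :
    ∀ (i : Nat) (filled : List String) (last : String), pics.drop i = suf →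
    bifA_loop pics i suf filled last = filled ++ bifB_fill last (suf.zip (nxtList suf)) := by
  induction suf with
  | nil => intro i filled last _; simp [bifA_loop, bifB_fill]
  | cons pic rest ih =>
    intro i filled last hdrop
    have hdrop' : pics.drop (i + 1) = rest := by
      have : (pics.drop i).drop 1 = pics.drop (i + 1) := by
        rw [List.drop_drop]
      rw [← this, hdrop]; rfl
    have hfn : bifA_findNext pics (i + 1) = firstNB rest := by
      rw [findNext_eq, hdrop']
    rw [bifA_loop, nxtList]
    by_cases hb : PySem.Str.strip pic ≠ ""
    · rw [if_pos hb]
      rw [ih (i + 1) (filled ++ [pic]) pic hdrop']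
      simp [bifB_fill, hb]
    · rw [if_neg hb]
      simp only [hfn]
      by_cases hg : firstNB rest = "" ∨ PySem.Str.endswith (PySem.Str.lower (firstNB rest)) ".gif" = true
      · rw [if_pos hg, ih (i + 1) (filled ++ [last]) last hdrop']
        rw [List.zip_cons_cons, bifB_fill, if_neg hb, if_pos hg, List.append_assoc,
            List.singleton_append]
      · rw [if_neg hg, ih (i + 1) (filled ++ [firstNB rest]) last hdrop']
        rw [List.zip_cons_cons, bifB_fill, if_neg hb, if_neg hg, List.append_assoc,
            List.singleton_append]

-- ===== VERDICT (by name: the statement is the Claim_ definition above) =====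
theorem build_image_files_spec : Claim_equal_build_image_files := by
  intro unique_id pictures _
  unfold Spec_build_image_files build_image_files build_image_files_alt
  simp only [foldr_nxtStep, List.headD_cons]
  rw [loop_eq_fill _ _ 0 [] _ List.drop_zero]
  simp
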